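-- pv_equiv track=rewrite | github.com/BrynjarGeir/LeetCode | Easy/increasing_decreasing_string.py | sortString
-- ===== SOURCE A (Python) =====
-- def sortString(s: str) -> str:
--         if len(s) == 1: return s
--         seen = []; letters = sorted(list(set(s))); ans = ''; s = list(s); n = len(letters)
--         while s:
--             curr = ''; i = 0
--             while i < len(letters):
--                 if letters[i] in s:
--                     curr = curr + letters[i]
--                     s.remove(letters[i])
--                     i += 1
--                 else:
--                     letters.remove(letters[i])
--             ans = ans + curr
--             curr = ''; i = len(letters)-1
--             while i > -1:
--                 if letters[i] in s:
--                     curr = curr + letters[i]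
--                     s.remove(letters[i])
--                     i -= 1
--                 else:
--                     letters.remove(letters[i])
--                     i -= 1
--             ans = ans + curr
--         return ans
-- ===== SOURCE B (Python) =====
-- def sortString(s: str) -> str:
--     counts = {}
--     for c in s:
--         counts[c] = counts.get(c, 0) + 1
--     asc = sorted(counts)
--     m = max(counts.values(), default=0)
--     parts = []
--     for k in range(m):
--         chars = [c for c in asc if counts[c] > k]
--         if k % 2:
--             chars.reverse()
--         parts.append(''.join(chars))
--     return ''.join(parts)
-- ===== Notes on version B (the rewrite author's own statement) =====
-- stated objective: faster
-- what changed: A repeatedly rescans and mutates the remaining character list with membership tests and element removal (quadratic); B counts character frequencies once, then emits the answer by alternately sweeping the sorted distinct characters forward and backward, filtering by remaining count.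
import Mathlib
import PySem

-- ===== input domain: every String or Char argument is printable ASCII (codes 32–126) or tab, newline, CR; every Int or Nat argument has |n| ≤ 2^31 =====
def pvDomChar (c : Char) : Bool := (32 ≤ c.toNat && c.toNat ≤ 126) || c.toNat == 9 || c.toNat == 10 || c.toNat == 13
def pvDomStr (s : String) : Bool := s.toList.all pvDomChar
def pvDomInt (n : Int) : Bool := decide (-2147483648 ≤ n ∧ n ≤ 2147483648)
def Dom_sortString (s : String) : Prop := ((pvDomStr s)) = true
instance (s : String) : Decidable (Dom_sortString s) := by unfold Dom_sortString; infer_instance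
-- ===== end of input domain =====

-- B replaces A's quadratic remove/in scans over the shrinking character list by a frequency
-- table and stateless alternating filtered sweeps of the sorted distinct characters (faster).

-- B replaces A's quadratic remove/in scans over a shrinking character list by one frequency
-- table and stateless alternating filtered sweeps over the sorted distinct characters.

-- ===== PORT A =====
-- Both inner while-loops of A scan `letters` by index (up: left→right, down: right→left),
-- emitting letters[i] and removing one copy from s when `letters[i] in s` holds, else deleting
-- letters[i] from `letters`.  As `letters` is duplicate-free, letters.remove(letters[i]) deletes
-- exactly position i, so each loop is this single traversal (the down loop applied to
-- letters.reverse); `remove?` is only taken under the membership guard, so `getD` never fires.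
-- Returns (curr, remaining s, kept letters in traversal order).
def pvPassA (letters s : List Char) : List Char × List Char × List Char :=
  match letters with
  | [] => ([], s, [])
  | c :: rest =>
    if s.contains c then
      let r := pvPassA rest ((PySem.List.remove? s c).getD s)
      (c :: r.1, r.2.1, c :: r.2.2)
    else
      pvPassA rest s

-- outer `while s:` loop; fuel `len(s)+1` is exact: every iteration with s ≠ [] removes ≥ 1 char
def pvLoopA (fuel : Nat) (s letters ans : List Char) : List Char :=
  match fuel with
  | 0 => ans
  | f + 1 =>
    if s.isEmpty then ans
    else
      let u := pvPassA letters s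
      let d := pvPassA u.2.2.reverse u.2.1
      pvLoopA f d.2.1 d.2.2.reverse (ans ++ u.1 ++ d.1)

def sortString (s : String) : String :=
  if PySem.Str.len s == 1 then s
  else
    let letters := PySem.List.sorted (PySem.Set.ofList s.toList) (fun c => c)
    String.ofList (pvLoopA (s.toList.length + 1) s.toList letters [])

-- ===== PORT B =====
def sortString_alt (s : String) : String :=
  let counts := s.toList.foldl (fun d c => d.insert c (d.getD c 0 + 1)) PySem.Dict.empty
  let asc := PySem.List.sorted counts.keys (fun c => c)
  let m := (PySem.List.max? counts.values (fun v => v)).getD 0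
  let parts := (PySem.List.pyRange 0 m).foldl
    (fun acc k =>
      let chars := asc.filter (fun c => decide (k < counts.getD c 0))
      acc ++ (if PySem.Int.mod k 2 != 0 then chars.reverse else chars)) []
  String.ofList parts

-- ===== PRECONDITION & SPEC =====
def Spec_sortString (s : String) (out : String) : Prop := out = sortString_alt s
instance (s : String) (out : String) : Decidable (Spec_sortString s out) := by unfold Spec_sortString; infer_instance

-- ===== CLAIM (what is proved, stated in full; the proofs are below) =====
def Claim_equal_sortString : Prop := ∀ (s : String), Dom_sortString s → Spec_sortString s (sortString s)

-- ===== LEMMAS AND PROOFS =====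

def pvStep (t : List Char) (c : Char) : List Char := (PySem.List.remove? t c).getD t

lemma pvStep_count (t : List Char) (c d : Char) :
    (pvStep t c).count d = t.count d - (if d = c ∧ c ∈ t then 1 else 0) := by
  unfold pvStep
  by_cases h : c ∈ t
  · rw [PySem.List.remove?_eq_some_erase t c h]
    simp [List.count_erase, h]
    by_cases hdc : d = c
    · subst hdc; simp
    · rw [if_neg (fun he => hdc he.symm)]; simp [hdc]
  · rw [(PySem.List.remove?_eq_none_iff t c).mpr h]
    simp [h]

lemma pvStep_mem (t : List Char) (c d : Char) (h : d ≠ c) : d ∈ pvStep t c ↔ d ∈ t := by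
  rw [← List.count_pos_iff, ← List.count_pos_iff, pvStep_count]
  simp [h]

lemma pvStep_length_le (t : List Char) (c : Char) : (pvStep t c).length ≤ t.length := by
  unfold pvStep
  by_cases h : c ∈ t
  · rw [PySem.List.remove?_eq_some_erase t c h]
    simp [h]
  · rw [(PySem.List.remove?_eq_none_iff t c).mpr h]; simp

lemma pvStep_length_lt (t : List Char) (c : Char) (h : c ∈ t) :
    (pvStep t c).length < t.length := by
  unfold pvStep
  rw [PySem.List.remove?_eq_some_erase t c h]
  simp [h]
  cases t with
  | nil => simp at h
  | cons a l => simp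
lemma pvPassA_spec (ls : List Char) : ∀ (t : List Char), ls.Nodup →
    pvPassA ls t = (ls.filter (fun c => decide (c ∈ t)), ls.foldl pvStep t,
                    ls.filter (fun c => decide (c ∈ t))) := by
  induction ls with
  | nil => intro t _; simp [pvPassA]
  | cons c rest ih =>
    intro t hnd
    rw [List.nodup_cons] at hnd
    have hrest := ih ((PySem.List.remove? t c).getD t) hnd.2
    by_cases h : c ∈ t
    · have hc : t.contains c = true := List.contains_iff_mem.mpr h
      simp only [pvPassA, hc, if_pos]
      rw [hrest]
      have hfilt : rest.filter (fun d => decide (d ∈ (PySem.List.remove? t c).getD t))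
          = rest.filter (fun d => decide (d ∈ t)) := by
        apply List.filter_congr
        intro d hd
        have hne : d ≠ c := fun he => hnd.1 (he ▸ hd)
        rw [show ((PySem.List.remove? t c).getD t) = pvStep t c from rfl]
        simp [pvStep_mem t c d hne]
      simp [h, hc, hfilt, List.foldl_cons, pvStep]
    · have hc : t.contains c = false := by
        simp [List.contains_iff_mem, h]
      simp only [pvPassA, hc, Bool.false_eq_true, if_neg, ite_false]
      rw [ih t hnd.2]
      have : pvStep t c = t := by
        unfold pvStep; rw [(PySem.List.remove?_eq_none_iff t c).mpr h]; rfl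
      simp [h, List.foldl_cons, this]

lemma foldl_pvStep_count (ls : List Char) : ∀ (t : List Char) (d : Char), ls.Nodup →
    (ls.foldl pvStep t).count d = t.count d - (if d ∈ ls ∧ d ∈ t then 1 else 0) := by
  induction ls with
  | nil => intro t d _; simp
  | cons c rest ih =>
    intro t d hnd
    rw [List.nodup_cons] at hnd
    rw [List.foldl_cons, ih (pvStep t c) d hnd.2]
    rw [pvStep_count]
    by_cases hdc : d = c
    · subst hdc
      have hnr : d ∉ rest := hnd.1
      by_cases hdt : d ∈ t <;> simp [hnr, hdt]
    · have hmem : d ∈ pvStep t c ↔ d ∈ t := pvStep_mem t c d hdc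
      by_cases hdt : d ∈ t
      · by_cases hdr : d ∈ rest <;> simp [hdc, hdt, hdr, hmem.mpr hdt]
      · have : d ∉ pvStep t c := fun hx => hdt (hmem.mp hx)
        simp [hdc, hdt, this]

lemma foldl_pvStep_length_le (ls : List Char) : ∀ (t : List Char),
    (ls.foldl pvStep t).length ≤ t.length := by
  induction ls with
  | nil => intro t; simp
  | cons c rest ih =>
    intro t
    calc (rest.foldl pvStep (pvStep t c)).length ≤ (pvStep t c).length := ih _
      _ ≤ t.length := pvStep_length_le t c

lemma foldl_pvStep_length_lt (ls : List Char) : ∀ (t : List Char) (c : Char),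
    c ∈ ls → c ∈ t → (ls.foldl pvStep t).length < t.length := by
  induction ls with
  | nil => intro t c h; simp at h
  | cons a rest ih =>
    intro t c hc hct
    rw [List.foldl_cons]
    rcases List.mem_cons.mp hc with h | h
    · subst h
      calc (rest.foldl pvStep (pvStep t c)).length ≤ (pvStep t c).length :=
            foldl_pvStep_length_le rest _
        _ < t.length := pvStep_length_lt t c hct
    · by_cases hca : c = a
      · subst hca
        calc (rest.foldl pvStep (pvStep t c)).length ≤ (pvStep t c).length :=
              foldl_pvStep_length_le rest _
          _ < t.length := pvStep_length_lt t c hct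
      · have : c ∈ pvStep t a := (pvStep_mem t a c hca).mpr hct
        calc (rest.foldl pvStep (pvStep t a)).length < (pvStep t a).length := ih _ c h this
          _ ≤ t.length := pvStep_length_le t a
def pvChunk (asc0 : List Char) (f : Char → Nat) (k : Nat) : List Char :=
  let chars := asc0.filter (fun c => decide (k < f c))
  if k % 2 == 1 then chars.reverse else chars

lemma pvChunk_eq_nil (asc0 : List Char) (f : Char → Nat) (k : Nat) (h : ∀ c, f c ≤ k) :
    pvChunk asc0 f k = [] := by
  unfold pvChunk
  have hf : asc0.filter (fun c => decide (k < f c)) = [] := by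
    rw [List.filter_eq_nil_iff]; intro c _; simp; exact h c
  simp [hf]

lemma pvLoopA_spec (asc0 : List Char) (f : Char → Nat)
    (hnd : asc0.Nodup) (hmem : ∀ c, 0 < f c → c ∈ asc0) :
    ∀ (fuel j r : Nat) (t ls ans : List Char),
    (∀ c, t.count c = f c - 2*j) →
    ls = asc0.filter (fun c => decide (2*j ≤ f c)) →
    t.length ≤ fuel →
    (∀ c, f c ≤ 2*j + 2*r) →
    pvLoopA fuel t ls ans
      = ans ++ (List.range r).flatMap
          (fun i => pvChunk asc0 f (2*(j+i)) ++ pvChunk asc0 f (2*(j+i)+1)) := by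
  intro fuel
  induction fuel with
  | zero =>
    intro j r t ls ans ht hls hlen hr
    have htnil : t = [] := List.eq_nil_of_length_eq_zero (Nat.le_zero.mp hlen)
    subst htnil
    have hfc : ∀ c, f c ≤ 2*j := by
      intro c; have := ht c; simp at this; omega
    simp only [pvLoopA]
    have : ∀ i ∈ List.range r,
        (pvChunk asc0 f (2*(j+i)) ++ pvChunk asc0 f (2*(j+i)+1)) = [] := by
      intro i _
      rw [pvChunk_eq_nil _ _ _ (fun c => by have := hfc c; omega),
          pvChunk_eq_nil _ _ _ (fun c => by have := hfc c; omega)]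
      rfl
    rw [List.flatMap_eq_nil_iff.mpr this]; simp
  | succ n ih =>
    intro j r t ls ans ht hls hlen hr
    by_cases hte : t = []
    · subst hte
      have hfc : ∀ c, f c ≤ 2*j := by
        intro c; have := ht c; simp at this; omega
      simp only [pvLoopA, List.isEmpty_nil, if_pos]
      have : ∀ i ∈ List.range r,
          (pvChunk asc0 f (2*(j+i)) ++ pvChunk asc0 f (2*(j+i)+1)) = [] := by
        intro i _
        rw [pvChunk_eq_nil _ _ _ (fun c => by have := hfc c; omega),
            pvChunk_eq_nil _ _ _ (fun c => by have := hfc c; omega)]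
        rfl
      rw [List.flatMap_eq_nil_iff.mpr this]; simp
    · obtain ⟨c0, hc0⟩ := List.exists_mem_of_ne_nil t hte
      have hc0f : 2*j < f c0 := by
        have h1 : 0 < t.count c0 := List.count_pos_iff.mpr hc0
        have := ht c0; omega
      cases r with
      | zero => exact absurd (hr c0) (by omega)
      | succ r' =>
      have hndls : ls.Nodup := by rw [hls]; exact hnd.filter _
      have hE1nd : (asc0.filter (fun c => decide (2*j < f c))).Nodup := hnd.filter _
      -- one unfolding of the loop
      simp only [pvLoopA, List.isEmpty_iff, hte, if_false]
      rw [pvPassA_spec ls t hndls]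
      -- the up sweep emits E1
      have hfilt1 : ls.filter (fun c => decide (c ∈ t))
          = asc0.filter (fun c => decide (2*j < f c)) := by
        rw [hls, List.filter_filter]
        apply List.filter_congr
        intro c _
        have hct : c ∈ t ↔ 2*j < f c := by
          rw [← List.count_pos_iff, ht c]; omega
        by_cases h2 : 2*j < f c
        · simp [hct, h2, Nat.le_of_lt h2]
        · simp [hct, h2] <;> omega
      have ht1 : ∀ c, (ls.foldl pvStep t).count c = f c - (2*j+1) := by
        intro c
        rw [foldl_pvStep_count ls t c hndls, ht c]
        by_cases hfc : 2*j < f c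
        · have hct : c ∈ t := List.count_pos_iff.mp (by rw [ht c]; omega)
          have hca : c ∈ asc0 := hmem c (by omega)
          have hcls : c ∈ ls := by
            rw [hls]; exact List.mem_filter.mpr ⟨hca, by simp; omega⟩
          simp [hcls, hct]; omega
        · have hct : t.count c = 0 := by rw [ht c]; omega
          have : c ∉ t := by rw [← List.count_pos_iff]; omega
          simp [this]; omega
      rw [hfilt1]
      rw [pvPassA_spec _ _ (List.nodup_reverse.mpr hE1nd)]
      -- the down sweep emits E2.reverse
      have hfilt2 : (asc0.filter (fun c => decide (2*j < f c))).reverse.filter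
            (fun c => decide (c ∈ ls.foldl pvStep t))
          = (asc0.filter (fun c => decide (2*j+1 < f c))).reverse := by
        rw [List.filter_reverse]
        congr 1
        rw [List.filter_filter]
        apply List.filter_congr
        intro c _
        have hct : c ∈ ls.foldl pvStep t ↔ 2*j+1 < f c := by
          rw [← List.count_pos_iff, ht1 c]; omega
        by_cases h2 : 2*j+1 < f c
        · simp [hct, h2] <;> omega
        · simp [hct, h2] <;> omega
      rw [hfilt2]
      have hndE1r : ((asc0.filter (fun c => decide (2*j < f c))).reverse).Nodup :=
        List.nodup_reverse.mpr hE1nd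
      have ht2 : ∀ c,
          ((asc0.filter (fun c => decide (2*j < f c))).reverse.foldl pvStep
            (ls.foldl pvStep t)).count c = f c - 2*(j+1) := by
        intro c
        rw [foldl_pvStep_count _ _ c hndE1r, ht1 c]
        by_cases hfc : 2*j+1 < f c
        · have hct : c ∈ ls.foldl pvStep t :=
            List.count_pos_iff.mp (by rw [ht1 c]; omega)
          have hca : c ∈ asc0 := hmem c (by omega)
          have hcE : c ∈ (asc0.filter (fun c => decide (2*j < f c))).reverse := by
            rw [List.mem_reverse]; exact List.mem_filter.mpr ⟨hca, by simp; omega⟩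
          simp [hcE, hct]; omega
        · have : c ∉ ls.foldl pvStep t := by
            rw [← List.count_pos_iff, ht1 c]; omega
          simp [this]; omega
      -- fuel for the recursive call
      have hlen1 : (ls.foldl pvStep t).length < t.length := by
        have hcls : c0 ∈ ls := by
          rw [hls]
          exact List.mem_filter.mpr ⟨hmem c0 (by omega), by simp; omega⟩
        exact foldl_pvStep_length_lt ls t c0 hcls hc0
      have hlen2 :
          ((asc0.filter (fun c => decide (2*j < f c))).reverse.foldl pvStep
            (ls.foldl pvStep t)).length ≤ n := by
        have := foldl_pvStep_length_le
          ((asc0.filter (fun c => decide (2*j < f c))).reverse) (ls.foldl pvStep t)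
        omega
      rw [List.reverse_reverse]
      rw [ih (j+1) r' _ _ _ ht2
        (by apply List.filter_congr; intro c _
            exact decide_eq_decide.mpr (by omega))
        hlen2 (fun c => by have := hr c; omega)]
      -- reassemble: first round = pvChunk (2j) ++ pvChunk (2j+1)
      rw [List.range_succ_eq_map, List.flatMap_cons, List.flatMap_map]
      simp only [Function.comp, Nat.succ_eq_add_one]
      have hfun : (fun a => pvChunk asc0 f (2 * (j + (a + 1))) ++ pvChunk asc0 f (2 * (j + (a + 1)) + 1))
          = (fun i => pvChunk asc0 f (2 * (j + 1 + i)) ++ pvChunk asc0 f (2 * (j + 1 + i) + 1)) := by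
        funext a; rw [show j + (a + 1) = j + 1 + a from by omega]
      rw [hfun]
      unfold pvChunk
      simp [Nat.mul_mod_right, Nat.mul_add_mod, List.append_assoc]
lemma pair_flatMap (asc0 : List Char) (f : Char → Nat) (r : Nat) :
    (List.range r).flatMap (fun i => pvChunk asc0 f (2*i) ++ pvChunk asc0 f (2*i+1))
      = (List.range (2*r)).flatMap (pvChunk asc0 f) := by
  induction r with
  | zero => simp
  | succ r ih =>
    rw [List.range_succ, List.flatMap_append, ih,
        show 2*(r+1) = (2*r+1)+1 from by omega,
        List.range_succ, List.flatMap_append, List.range_succ, List.flatMap_append]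
    simp [List.append_assoc]

lemma flatMap_range_extend (asc0 : List Char) (f : Char → Nat) (M N : Nat)
    (h : M ≤ N) (hM : ∀ c, f c ≤ M) :
    (List.range N).flatMap (pvChunk asc0 f) = (List.range M).flatMap (pvChunk asc0 f) := by
  rw [show N = M + (N - M) from by omega, List.range_add, List.flatMap_append, List.flatMap_map]
  have h2 : (List.range (N-M)).flatMap (fun a => pvChunk asc0 f (M + a)) = [] :=
    List.flatMap_eq_nil_iff.mpr (fun i _ => pvChunk_eq_nil asc0 f (M+i) (fun c => by have := hM c; omega))
  rw [h2]; simp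

lemma max_bound (s : String) (c : Char) :
    s.toList.count c ≤ ((PySem.List.max?
      (PySem.Dict.counter s.toList).values (fun v => v)).getD 0).toNat := by
  by_cases h : s.toList.count c = 0
  · simp [h]
  · have hmem : c ∈ s.toList := List.count_pos_iff.mp (by omega)
    have hv : ((s.toList.count c : Int)) ∈ (PySem.Dict.counter s.toList).values := by
      have : (PySem.Dict.counter s.toList).values
          = (PySem.Set.ofList s.toList).map (fun k => ((s.toList.count k : Int))) := by
        simp [PySem.Dict.values, PySem.Dict.items_counter]
      rw [this]
      exact List.mem_map.mpr ⟨c, (PySem.Set.mem_ofList _ _).mpr hmem, rfl⟩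
    cases hmax : PySem.List.max? (PySem.Dict.counter s.toList).values (fun v => v) with
    | none => rw [PySem.List.max?_eq_none_iff] at hmax; rw [hmax] at hv; simp at hv
    | some m =>
      have := PySem.List.max?_isMax hmax _ hv
      simp only [hmax, Option.getD_some]
      omega

lemma alt_spec (s : String) :
    sortString_alt s = String.ofList
      ((List.range (((PySem.List.max?
          (PySem.Dict.counter s.toList).values (fun v => v)).getD 0).toNat)).flatMap
        (pvChunk (PySem.List.sorted (PySem.Set.ofList s.toList) (fun c => c))
                 (fun c => s.toList.count c))) := by
  simp only [sortString_alt]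
  rw [PySem.Dict.foldl_insert_getD_add_one_eq_counter]
  rw [PySem.Dict.keys_counter]
  rw [PySem.List.foldl_append_eq_flatMap]
  congr 1
  rw [PySem.List.pyRange_one, List.flatMap_map]
  set M := ((PySem.List.max? (PySem.Dict.counter s.toList).values (fun v => v)).getD 0)
  have hM0 : (M - 0).toNat = M.toNat := by omega
  rw [hM0]
  simp only [List.nil_append]
  have hfun : ∀ a : ℕ,
      (if (PySem.Int.mod (0 + (a:ℤ)) 2 != 0) = true then
        (List.filter (fun c => decide (0 + (a:ℤ) < (PySem.Dict.counter s.toList).getD c 0))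
            (PySem.List.sorted (PySem.Set.ofList s.toList) fun c => c)).reverse
      else
        List.filter (fun c => decide (0 + (a:ℤ) < (PySem.Dict.counter s.toList).getD c 0))
          (PySem.List.sorted (PySem.Set.ofList s.toList) fun c => c))
      = pvChunk (PySem.List.sorted (PySem.Set.ofList s.toList) fun c => c)
          (fun c => List.count c s.toList) a := by
    intro a
    unfold pvChunk
    have h1 : (fun c => decide ((0:ℤ) + (a:ℤ) < (PySem.Dict.counter s.toList).getD c 0))
        = (fun c => decide (a < List.count c s.toList)) := by
      funext c; rw [PySem.Dict.getD_counter]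
      exact decide_eq_decide.mpr (by omega)
    rw [h1]
    have h2 : (PySem.Int.mod (0 + (a:ℤ)) 2 != 0) = (a % 2 == 1) := by
      have hm : PySem.Int.mod (0 + (a:ℤ)) 2 = ((a % 2 : ℕ) : ℤ) := by
        simp [PySem.Int.mod, Int.fmod_eq_emod]
      rw [hm]
      rcases Nat.mod_two_eq_zero_or_one a with h | h <;> simp [h]
    rw [h2]
  exact congrArg (fun g => List.flatMap g (List.range
    (((PySem.List.max? (PySem.Dict.counter s.toList).values fun v => v).getD 0).toNat)))
    (funext hfun)
lemma pv_main (s : String) : sortString s = sortString_alt s := by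
  have hnd : (PySem.List.sorted (PySem.Set.ofList s.toList) (fun c => c)).Nodup :=
    ((PySem.List.sorted_perm _ _ _).nodup_iff).mpr (PySem.Set.nodup_ofList _)
  have hmem : ∀ c, 0 < List.count c s.toList →
      c ∈ PySem.List.sorted (PySem.Set.ofList s.toList) (fun c => c) := by
    intro c h
    exact (PySem.List.mem_sorted _ _ _ _).mpr
      ((PySem.Set.mem_ofList _ _).mpr (List.count_pos_iff.mp h))
  unfold sortString
  by_cases h1 : PySem.Str.len s == 1
  · simp only [h1, if_true]
    have hlen : s.toList.length = 1 := by
      rw [PySem.Str.len_eq] at h1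
      simp at h1
      simpa using h1
    obtain ⟨c, hc⟩ := List.length_eq_one_iff.mp hlen
    rw [alt_spec s, hc]
    have hval : (PySem.Dict.counter [c]).values = [(1:ℤ)] := by
      rw [show (PySem.Dict.counter [c]).values
            = (PySem.Dict.counter [c]).items.map (·.2) from rfl,
          PySem.Dict.items_counter]
      simp
      exact ⟨c, rfl, by simp⟩
    have hM : ((PySem.List.max? (PySem.Dict.counter [c]).values fun v => v).getD 0).toNat = 1 := by
      rw [hval]; rfl
    rw [hM]
    have hsort : PySem.List.sorted (PySem.Set.ofList [c]) (fun c => c) = [c] := rfl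
    rw [hsort]
    have hchunk : pvChunk [c] (fun d => List.count d [c]) 0 = [c] := by
      unfold pvChunk; simp
    simp only [List.range_one, List.flatMap_cons, List.flatMap_nil, List.append_nil, hchunk]
    rw [← hc]
    simp
  · simp only [h1, Bool.false_eq_true, if_false]
    rw [alt_spec s]
    congr 1
    rw [pvLoopA_spec (PySem.List.sorted (PySem.Set.ofList s.toList) (fun c => c))
          (fun c => List.count c s.toList) hnd hmem
          (s.toList.length + 1) 0
          ((((PySem.List.max? (PySem.Dict.counter s.toList).values fun v => v).getD 0)).toNat)
          s.toList _ []
          (fun c => by simp)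
          (by symm; apply List.filter_eq_self.mpr; intro c _; simp)
          (by omega)
          (fun c => by have := max_bound s c
                       show List.count c s.toList ≤ _; omega)]
    simp only [Nat.zero_add, List.nil_append]
    rw [pair_flatMap]
    rw [flatMap_range_extend _ _ _ _ (by omega) (fun c => max_bound s c)]

-- ===== VERDICT (by name: the statement is the Claim_ definition above) =====
theorem sortString_spec : Claim_equal_sortString := by
  unfold Claim_equal_sortString
  intro s _
  unfold Spec_sortString
  exact pv_main s
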